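-- pv_equiv track=rewrite | github.com/natnaelawel/competitive-programming | codeforce/Contest11/FrogJumps.py | findMinDis
-- ===== SOURCE A (Python) =====
-- def findMinDis(paths):
--     res = [-1]
--     for i in range(len(paths)):
--         if paths[i] == "R":
--             res.append(i)
--     res.append(len(paths))
--     m = 0
--     for i in range(1, len(res)):
--         m = max(m, res[i] - res[i-1])
--
--     return m
-- ===== SOURCE B (Python) =====
-- def findMinDis(paths):
--     prev = -1
--     m = 0
--     for i, p in enumerate(paths):
--         if p == "R":
--             m = max(m, i - prev)
--             prev = i
--     return max(m, len(paths) - prev)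
-- ===== Notes on version B (the rewrite author's own statement) =====
-- stated objective: simpler
-- what changed: Replaced the intermediate index list plus second max-scan loop with a single pass keeping only a scalar previous-R position and running maximum.
import Mathlib
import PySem

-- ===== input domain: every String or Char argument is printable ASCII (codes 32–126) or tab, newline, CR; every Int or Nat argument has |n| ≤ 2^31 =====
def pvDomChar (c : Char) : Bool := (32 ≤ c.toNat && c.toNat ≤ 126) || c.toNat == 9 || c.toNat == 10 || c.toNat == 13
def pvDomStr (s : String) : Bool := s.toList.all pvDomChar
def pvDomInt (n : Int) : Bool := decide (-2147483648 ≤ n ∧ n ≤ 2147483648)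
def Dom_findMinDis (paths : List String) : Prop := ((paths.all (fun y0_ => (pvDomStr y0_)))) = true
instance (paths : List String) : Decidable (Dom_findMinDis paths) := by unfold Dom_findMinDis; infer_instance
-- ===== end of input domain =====

-- B replaces A's intermediate index list and second scan with a single pass keeping
-- a scalar previous-R position and running maximum (objective: simpler).

-- ===== PORT A =====
-- first loop of A: indices (starting at i) of elements equal to "R"
def pvCollectR (paths : List String) (i : Int) : List Int :=
  match paths with
  | [] => []
  | p :: t => if p == "R" then i :: pvCollectR t (i + 1) else pvCollectR t (i + 1)

-- second loop of A: m = max(m, res[i] - res[i-1]) over consecutive pairs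
def pvMaxGaps (res : List Int) (m : Int) : Int :=
  match res with
  | a :: b :: rest => pvMaxGaps (b :: rest) (max m (b - a))
  | _ => m

def findMinDis (paths : List String) : Int :=
  pvMaxGaps ((-1) :: (pvCollectR paths 0 ++ [(paths.length : Int)])) 0

-- ===== PORT B =====
-- single pass: state (prev, m); i is the running index
def pvScanB (paths : List String) (i : Int) (prev : Int) (m : Int) : Int × Int :=
  match paths with
  | [] => (prev, m)
  | p :: t =>
    if p == "R" then pvScanB t (i + 1) i (max m (i - prev))
    else pvScanB t (i + 1) prev m

def findMinDis_alt (paths : List String) : Int :=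
  let pm := pvScanB paths 0 (-1) 0
  max pm.2 ((paths.length : Int) - pm.1)

-- ===== PRECONDITION & SPEC =====
def Spec_findMinDis (paths : List String) (out : Int) : Prop := out = findMinDis_alt paths
instance (paths : List String) (out : Int) : Decidable (Spec_findMinDis paths out) := by unfold Spec_findMinDis; infer_instance

-- ===== CLAIM (what is proved, stated in full; the proofs are below) =====
def Claim_equal_findMinDis : Prop := ∀ (paths : List String), Dom_findMinDis paths → Spec_findMinDis paths (findMinDis paths)

-- ===== LEMMAS AND PROOFS =====
theorem pvMain (paths : List String) : ∀ (i prev m : Int),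
    pvMaxGaps (prev :: (pvCollectR paths i ++ [i + (paths.length : Int)])) m
      = max (pvScanB paths i prev m).2 (i + (paths.length : Int) - (pvScanB paths i prev m).1) := by
  induction paths with
  | nil =>
    intro i prev m
    simp [pvCollectR, pvScanB, pvMaxGaps]
  | cons p t ih =>
    intro i prev m
    by_cases h : p == "R"
    · have := ih (i + 1) i (max m (i - prev))
      simp only [pvCollectR, pvScanB, h, if_true, List.cons_append, pvMaxGaps]
      have harith : i + ((p :: t).length : Int) = (i + 1) + (t.length : Int) := by
        simp; ring
      rw [harith]
      exact this
    · have := ih (i + 1) prev m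
      simp only [pvCollectR, pvScanB, h]
      have harith : i + ((p :: t).length : Int) = (i + 1) + (t.length : Int) := by
        simp; ring
      rw [harith]
      exact this

-- ===== VERDICT (by name: the statement is the Claim_ definition above) =====
theorem findMinDis_spec : Claim_equal_findMinDis := by
  intro paths _
  unfold Spec_findMinDis findMinDis findMinDis_alt
  have := pvMain paths 0 (-1) 0
  simpa using this
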